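-- pv_equiv track=rewrite | github.com/ladonijaraze/goa_academy | GOA-homework-main/level56/cw/work.py | captainjack
-- ===== SOURCE A (Python) =====
-- def captainjack(gold_coin):
--     ships = [150, 200, 250, 300, 350]
--
--     if gold_coin == 0:
--         return "ეკიპაჟი აჯანყდება!"
--
--     for ship in ships:
--         if gold_coin >= ship:
--             return f"კაპიტანმა აირჩია გემი {ship} ოქროს მონეტიანი!"
--
--     return "ეკიპაჟი აჯანყდება!"
-- ===== SOURCE B (Python) =====
-- def captainjack(gold_coin):
--     # Since the ship list is ascending and the loop returns on the first
--     # affordable ship, the answer is a single threshold comparison.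
--     if gold_coin >= 150:
--         return "კაპიტანმა აირჩია გემი 150 ოქროს მონეტიანი!"
--     return "ეკიპაჟი აჯანყდება!"
-- ===== Notes on version B (the rewrite author's own statement) =====
-- stated objective: simpler
-- what changed: Replaces the ship list and the first-affordable loop by a single closed-form threshold comparison against 150, since the ascending list means the loop can only ever pick 150.
import Mathlib
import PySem

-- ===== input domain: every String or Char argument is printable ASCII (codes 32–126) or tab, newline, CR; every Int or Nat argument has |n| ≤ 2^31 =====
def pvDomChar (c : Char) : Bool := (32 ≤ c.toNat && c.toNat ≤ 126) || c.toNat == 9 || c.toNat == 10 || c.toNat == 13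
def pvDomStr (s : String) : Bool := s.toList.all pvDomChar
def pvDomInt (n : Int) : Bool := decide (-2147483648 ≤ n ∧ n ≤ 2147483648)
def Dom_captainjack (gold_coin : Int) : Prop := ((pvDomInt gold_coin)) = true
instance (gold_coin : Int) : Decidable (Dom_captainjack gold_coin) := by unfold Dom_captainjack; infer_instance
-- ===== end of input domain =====

-- ===== PORT A =====
-- B replaces the fixed-list first-affordable loop by one threshold comparison (simpler).
-- helper: the for-loop over ships, returning the first affordable ship's message
def captainjackLoop (gold_coin : Int) : List Int → String
  | [] => "ეკიპაჟი აჯანყდება!"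
  | ship :: rest =>
      if gold_coin ≥ ship then
        "კაპიტანმა აირჩია გემი " ++ PySem.Int.toStr ship ++ " ოქროს მონეტიანი!"
      else captainjackLoop gold_coin rest

def captainjack (gold_coin : Int) : String :=
  let ships : List Int := [150, 200, 250, 300, 350]
  if gold_coin = 0 then "ეკიპაჟი აჯანყდება!"
  else captainjackLoop gold_coin ships

-- ===== PORT B =====
def captainjack_alt (gold_coin : Int) : String :=
  if gold_coin ≥ 150 then "კაპიტანმა აირჩია გემი 150 ოქროს მონეტიანი!"
  else "ეკიპაჟი აჯანყდება!"

-- ===== PRECONDITION & SPEC =====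
def Spec_captainjack (gold_coin : Int) (out : String) : Prop := out = captainjack_alt gold_coin
instance (gold_coin : Int) (out : String) : Decidable (Spec_captainjack gold_coin out) := by unfold Spec_captainjack; infer_instance

-- ===== CLAIM (what is proved, stated in full; the proofs are below) =====
def Claim_equal_captainjack : Prop := ∀ (gold_coin : Int), Dom_captainjack gold_coin → Spec_captainjack gold_coin (captainjack gold_coin)

-- ===== LEMMAS AND PROOFS =====

-- ===== VERDICT (by name: the statement is the Claim_ definition above) =====
theorem captainjack_spec : Claim_equal_captainjack := by
  intro g _
  unfold Spec_captainjack captainjack captainjack_alt captainjackLoop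
  by_cases h0 : g = 0
  · subst h0; decide
  · simp only [if_neg h0]
    by_cases h : g ≥ 150
    · simp only [if_pos h]; decide
    · have h2 : ¬ g ≥ 200 := by omega
      have h3 : ¬ g ≥ 250 := by omega
      have h4 : ¬ g ≥ 300 := by omega
      have h5 : ¬ g ≥ 350 := by omega
      simp [captainjackLoop, h, h2, h3, h4, h5]
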